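-- pv_equiv track=rewrite | github.com/LETHIHUYNHNHU92/DPM245469_LETHIHUYNHNHU_DH25PM_NHOM04_TO02_NOPBAITAP_PYTHON | chương 6/cau9.py | phan_tich_list
-- ===== SOURCE A (Python) =====
-- import math
--
-- def is_prime(n):
--
--     if n < 2:
--         return False
--     if n == 2:
--         return True
--     if n % 2 == 0: # Loại trừ tất cả số chẵn > 2
--         return False
--
--     for i in range(3, int(math.sqrt(n)) + 1, 2):
--         if n % i == 0:
--             return False
--
--     return True
--
-- def phan_tich_list(M):
--
--     le = []; chan = []; nt = []; khong_nt = []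
--
--     for n in M:
--         if n % 2 != 0:
--             le.append(n)
--         else:
--             chan.append(n)
--
--         if is_prime(n):
--             nt.append(n)
--         else:
--             khong_nt.append(n)
--
--     return {
--         'le': le, 'chan': chan, 'nt': nt, 'khong_nt': khong_nt
--     }
-- ===== SOURCE B (Python) =====
-- import math
--
-- def phan_tich_list(M):
--     # Classify each DISTINCT value once via a memo dict, with a sqrt-free
--     # trial-division primality test (i*i <= n), then assemble the four
--     # groups by staged filtering passes that just look the tags up.
--     def is_prime(n):
--         if n < 2:
--             return False
--         if n < 4:
--             return True
--         if n % 2 == 0: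
--             return False
--         i = 3
--         while i * i <= n:
--             if n % i == 0:
--                 return False
--             i += 2
--         return True
--
--     cls = {}
--     for n in M:
--         if n not in cls:
--             cls[n] = (n % 2 != 0, is_prime(n))
--
--     return {
--         'le': [n for n in M if cls[n][0]],
--         'chan': [n for n in M if not cls[n][0]],
--         'nt': [n for n in M if cls[n][1]],
--         'khong_nt': [n for n in M if not cls[n][1]],
--     }
-- ===== Notes on version B (the rewrite author's own statement) =====
-- stated objective: alternative
-- what changed: B classifies each distinct value once into a memo dict (value -> (odd, prime)) using a sqrt-free i*i<=n trial-division primality test, then builds the four groups by staged filtering passes that only look tags up, instead of A's single loop that runs a math.sqrt-based prime test on every element while appending to four accumulators.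
import Mathlib
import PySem

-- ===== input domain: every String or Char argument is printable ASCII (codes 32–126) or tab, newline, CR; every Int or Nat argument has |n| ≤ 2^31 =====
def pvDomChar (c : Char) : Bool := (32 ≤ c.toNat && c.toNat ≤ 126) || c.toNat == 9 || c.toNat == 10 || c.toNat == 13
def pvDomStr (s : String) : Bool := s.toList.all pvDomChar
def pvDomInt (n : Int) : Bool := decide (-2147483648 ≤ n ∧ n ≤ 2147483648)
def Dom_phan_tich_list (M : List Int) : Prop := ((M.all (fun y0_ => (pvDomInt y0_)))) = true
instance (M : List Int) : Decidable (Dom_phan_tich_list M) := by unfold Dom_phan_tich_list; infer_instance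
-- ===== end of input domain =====

-- B replaces A's single four-accumulator loop (sqrt-bounded prime test run on every
-- element) by a memo dict classifying each distinct value once with a sqrt-free
-- i*i<=n trial division, plus four staged lookup-filter passes (alternative decomposition).

-- ===== PORT A =====
-- A's is_prime, ported step for step.
-- int(math.sqrt(n)) = Int.sqrt n: exact here since on the domain 2 < n ≤ 2^31 < 2^52,
-- where math.sqrt is correctly rounded and its floor is the integer square root.
def isPrime (n : Int) : Bool :=
  if n < 2 then false
  else if n == 2 then true
  else if PySem.Int.mod n 2 == 0 then false
  else !((PySem.List.pyRange 3 (Int.sqrt n + 1) 2).any (fun i => PySem.Int.mod n i == 0))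

-- one iteration of A's classifying loop over the four accumulators
def pvStepA (s : List Int × List Int × List Int × List Int) (n : Int) :
    List Int × List Int × List Int × List Int :=
  let (le, chan, nt, knt) := s
  let (le, chan) := if PySem.Int.mod n 2 != 0 then (le ++ [n], chan) else (le, chan ++ [n])
  let (nt, knt) := if isPrime n then (nt ++ [n], knt) else (nt, knt ++ [n])
  (le, chan, nt, knt)

def phan_tich_list (M : List Int) : List (String × List Int) :=
  let r := M.foldl pvStepA ([], [], [], [])
  [("le", r.1), ("chan", r.2.1), ("nt", r.2.2.1), ("khong_nt", r.2.2.2)]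

-- ===== PORT B =====
-- termination fact for B's while-loop: i*i ≤ n forces i ≤ n
theorem pvTrial_le {n i : Int} (h : i * i ≤ n) : i ≤ n := by
  have h1 : 2 * i ≤ i * i + 1 := by nlinarith [mul_self_nonneg (i - 1)]
  have h2 : 0 ≤ i * i := mul_self_nonneg i
  omega

-- B's while-loop: i = 3; while i*i <= n: if n % i == 0: return False; i += 2
def pvTrial (n i : Int) : Bool :=
  if h : i * i ≤ n then
    if PySem.Int.mod n i == 0 then false
    else pvTrial n (i + 2)
  else true
termination_by (n + 1 - i).toNat
decreasing_by
  have := pvTrial_le h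
  omega

-- B's is_prime
def isPrimeB (n : Int) : Bool :=
  if n < 2 then false
  else if n < 4 then true
  else if PySem.Int.mod n 2 == 0 then false
  else pvTrial n 3

def pvClass (n : Int) : Bool × Bool := (PySem.Int.mod n 2 != 0, isPrimeB n)

-- first loop of B: cls = {}; for n in M: if n not in cls: cls[n] = (n%2!=0, is_prime(n))
def pvMemo (M : List Int) : PySem.Dict Int (Bool × Bool) :=
  M.foldl (fun d n => if d.contains n then d else d.insert n (pvClass n)) PySem.Dict.empty

-- cls[n] is ported as getD with a dummy default: every n in M was inserted by the
-- first loop, so the KeyError branch of Python's cls[n] is unreachable.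
def phan_tich_list_alt (M : List Int) : List (String × List Int) :=
  let cls := pvMemo M
  [("le", M.filter (fun n => (cls.getD n (false, false)).1)),
   ("chan", M.filter (fun n => !(cls.getD n (false, false)).1)),
   ("nt", M.filter (fun n => (cls.getD n (false, false)).2)),
   ("khong_nt", M.filter (fun n => !(cls.getD n (false, false)).2))]

-- ===== PRECONDITION & SPEC =====
def Spec_phan_tich_list (M : List Int) (out : List (String × List Int)) : Prop := out = phan_tich_list_alt M
instance (M : List Int) (out : List (String × List Int)) : Decidable (Spec_phan_tich_list M out) := by unfold Spec_phan_tich_list; infer_instance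

-- ===== CLAIM =====
def Claim_equal_phan_tich_list : Prop := ∀ (M : List Int), Dom_phan_tich_list M → Spec_phan_tich_list M (phan_tich_list M)

-- ===== LEMMAS AND PROOFS =====
-- i ≤ Int.sqrt n ↔ i*i ≤ n (for 0 < i, 0 ≤ n)
theorem pv_le_sqrt {n i : Int} (hi : 0 < i) (hn : 0 ≤ n) : i ≤ Int.sqrt n ↔ i * i ≤ n := by
  rw [Int.sqrt]
  have h1 : i ≤ (Nat.sqrt n.toNat : Int) ↔ i.toNat ≤ Nat.sqrt n.toNat := by omega
  rw [h1, Nat.le_sqrt]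
  have h2 : ((i.toNat * i.toNat : Nat) : Int) = i * i := by
    push_cast [Int.toNat_of_nonneg hi.le]; ring
  omega

-- range with step 2: empty / cons unfoldings
theorem pvRange2_nil (a b : Int) (h : b ≤ a) : PySem.List.pyRange a b 2 = [] := by
  rw [PySem.List.pyRange_of_pos a b (by norm_num), if_neg (by omega)]
  simp

theorem pvRange2_cons (a b : Int) (h : a < b) :
    PySem.List.pyRange a b 2 = a :: PySem.List.pyRange (a + 2) b 2 := by
  rw [PySem.List.pyRange_of_pos a b (by norm_num), PySem.List.pyRange_of_pos (a+2) b (by norm_num)]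
  by_cases h2 : a + 2 < b
  · rw [if_pos h, if_pos h2]
    have hc : ((b - a + 2 - 1) / 2).toNat = ((b - (a + 2) + 2 - 1) / 2).toNat + 1 := by omega
    rw [hc, List.range_succ_eq_map]
    simp [List.map_map]
    intro k _; ring
  · rw [if_pos h, if_neg h2]
    have hc : ((b - a + 2 - 1) / 2).toNat = 1 := by omega
    rw [hc]
    simp

-- B's while-loop agrees with A's range-based scan
theorem pvTrial_eq_range (n : Int) (hn : 0 ≤ n) :
    ∀ i : Int, 0 < i →
      pvTrial n i = !((PySem.List.pyRange i (Int.sqrt n + 1) 2).any (fun j => PySem.Int.mod n j == 0)) := by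
  intro i hi
  induction i using pvTrial.induct n with
  | case1 i h hm =>
    rw [pvTrial, dif_pos h, if_pos (by simpa using hm)]
    rw [pvRange2_cons i (Int.sqrt n + 1) (by have := (pv_le_sqrt hi hn).mpr h; omega)]
    simp [hm]
  | case2 i h hm ih =>
    rw [pvTrial, dif_pos h, if_neg (by simpa using hm)]
    rw [pvRange2_cons i (Int.sqrt n + 1) (by have := (pv_le_sqrt hi hn).mpr h; omega)]
    simp only [List.any_cons]
    rw [ih (by omega)]
    simp [hm]
  | case3 i h =>
    rw [pvTrial, dif_neg h]
    rw [pvRange2_nil i (Int.sqrt n + 1) (by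
      by_contra hb
      exact h ((pv_le_sqrt hi hn).mp (by omega)))]
    simp

-- the two primality tests agree
theorem isPrimeB_eq (n : Int) : isPrimeB n = isPrime n := by
  by_cases h2 : n < 2
  · simp [isPrime, isPrimeB, h2]
  by_cases h4 : n < 4
  · have h23 : n = 2 ∨ n = 3 := by omega
    have hs3 : Int.sqrt 3 = 1 := by rw [Int.sqrt, show Int.toNat 3 = 3 from rfl]; norm_num
    rcases h23 with rfl | rfl
    · norm_num [isPrime, isPrimeB]
    · rw [isPrime, isPrimeB, hs3, show (1 + 1 : Int) = 2 from rfl,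
        pvRange2_nil 3 2 (by norm_num)]
      decide
  · have hne2 : ¬((n == 2) = true) := by simp; omega
    rw [isPrime, isPrimeB, if_neg h2, if_neg h2, if_neg h4, if_neg hne2]
    by_cases hm : (PySem.Int.mod n 2 == 0) = true
    · rw [if_pos hm, if_pos hm]
    · rw [if_neg hm, if_neg hm]
      exact pvTrial_eq_range n (by omega) 3 (by norm_num)

-- every value stored in the memo is its classification
theorem pvMemo_sound (L : List Int) (d : PySem.Dict Int (Bool × Bool))
    (hd : ∀ k v, d.get? k = some v → v = pvClass k) :
    ∀ k v, (L.foldl (fun d n => if d.contains n then d else d.insert n (pvClass n)) d).get? k = some v → v = pvClass k := by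
  induction L generalizing d with
  | nil => simpa using hd
  | cons x L ih =>
    rw [List.foldl_cons]
    apply ih
    intro k v hkv
    by_cases hc : d.contains x
    · rw [if_pos hc] at hkv; exact hd k v hkv
    · rw [if_neg hc, PySem.Dict.get?_insert] at hkv
      by_cases hk : k = x
      · rw [if_pos hk] at hkv
        subst hk
        exact (Option.some_inj.mp hkv).symm
      · rw [if_neg hk] at hkv
        exact hd k v hkv

-- membership in the memo is monotone through the loop
theorem pvMemo_mono (L : List Int) (d : PySem.Dict Int (Bool × Bool)) (x : Int)
    (hx : d.contains x = true) :
    (L.foldl (fun d n => if d.contains n then d else d.insert n (pvClass n)) d).contains x = true := by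
  induction L generalizing d with
  | nil => simpa using hx
  | cons y L ih =>
    rw [List.foldl_cons]
    apply ih
    by_cases hc : d.contains y
    · rwa [if_pos hc]
    · rw [if_neg hc, PySem.Dict.contains_insert, hx, Bool.or_true]

-- every element of M ends up in the memo
theorem pvMemo_contains (L : List Int) (d : PySem.Dict Int (Bool × Bool)) (x : Int) (hx : x ∈ L) :
    (L.foldl (fun d n => if d.contains n then d else d.insert n (pvClass n)) d).contains x = true := by
  induction L generalizing d with
  | nil => cases hx
  | cons y L ih =>
    rw [List.foldl_cons]
    rcases List.mem_cons.mp hx with rfl | hxL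
    · apply pvMemo_mono
      by_cases hc : d.contains x
      · rwa [if_pos hc]
      · rw [if_neg hc]; exact PySem.Dict.contains_insert_self _ _ _
    · exact ih _ hxL

-- the memo lookup of an element of M is its classification
theorem pvMemo_getD (M : List Int) (x : Int) (hx : x ∈ M) :
    (pvMemo M).getD x (false, false) = pvClass x := by
  have hc : (pvMemo M).contains x = true := pvMemo_contains M PySem.Dict.empty x hx
  rw [PySem.Dict.contains_eq_isSome_get?] at hc
  obtain ⟨v, hv⟩ := Option.isSome_iff_exists.mp hc
  have hcls := pvMemo_sound M PySem.Dict.empty (by simp [PySem.Dict.get?_empty]) x v hv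
  rw [PySem.Dict.getD_eq_get?_getD, hv]
  simpa using hcls

-- Invariant of A's loop: the four accumulators are the four filters, prefixed by
-- their starting values.
theorem phan_tich_list_loop (M le chan nt knt : List Int) :
    M.foldl pvStepA (le, chan, nt, knt)
    = (le ++ M.filter (fun n => PySem.Int.mod n 2 != 0),
       chan ++ M.filter (fun n => PySem.Int.mod n 2 == 0),
       nt ++ M.filter (fun n => isPrime n),
       knt ++ M.filter (fun n => !isPrime n)) := by
  induction M generalizing le chan nt knt with
  | nil => simp
  | cons x xs ih =>
    rw [List.foldl_cons]
    have hstep : pvStepA (le, chan, nt, knt) x =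
        ((if PySem.Int.mod x 2 != 0 then le ++ [x] else le),
         (if PySem.Int.mod x 2 != 0 then chan else chan ++ [x]),
         (if isPrime x then nt ++ [x] else nt),
         (if isPrime x then knt else knt ++ [x])) := by
      unfold pvStepA; split_ifs <;> rfl
    rw [hstep, ih]
    rcases Int.emod_two_eq x with hm | hm <;> by_cases hp : isPrime x = true <;>
      simp [hm, hp]

-- ===== VERDICT =====
theorem phan_tich_list_spec : Claim_equal_phan_tich_list := by
  intro M _
  unfold Spec_phan_tich_list phan_tich_list phan_tich_list_alt
  rw [phan_tich_list_loop]
  have hgetD : ∀ x ∈ M, (pvMemo M).getD x (false, false) = pvClass x :=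
    fun x hx => pvMemo_getD M x hx
  have h1 : M.filter (fun n => ((pvMemo M).getD n (false, false)).1)
      = M.filter (fun n => PySem.Int.mod n 2 != 0) :=
    List.filter_congr fun x hx => by rw [hgetD x hx]; simp [pvClass]
  have h2 : M.filter (fun n => !((pvMemo M).getD n (false, false)).1)
      = M.filter (fun n => PySem.Int.mod n 2 == 0) :=
    List.filter_congr fun x hx => by rw [hgetD x hx]; simp [pvClass, bne]
  have h3 : M.filter (fun n => ((pvMemo M).getD n (false, false)).2)
      = M.filter (fun n => isPrime n) :=
    List.filter_congr fun x hx => by rw [hgetD x hx]; simp [pvClass, isPrimeB_eq]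
  have h4 : M.filter (fun n => !((pvMemo M).getD n (false, false)).2)
      = M.filter (fun n => !isPrime n) :=
    List.filter_congr fun x hx => by rw [hgetD x hx]; simp [pvClass, isPrimeB_eq]
  simp only [h1, h2, h3, h4, List.nil_append]
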